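-- pv_equiv track=rewrite | github.com/cliffpham/algos_dataStructures | algos/stacks/basic_calculator.py | get_integer
-- ===== SOURCE A (Python) =====
-- def peek(stack):
--     top = None
--     if len(stack) >= 1:
--         top = stack[len(stack) - 1]
--     return top
--
-- def get_integer(eval):
--     on = True
--     res = 0
--     while on:
--         cur = peek(eval)
--         if len(eval) >= 1 and ord(cur) >= 48 and ord(cur) <= 57:
--             cur = eval.pop()
--             res *= 10
--             res += int(cur)
--         else:
--             on = False
--     return res
-- ===== SOURCE B (Python) =====
-- def get_integer(stack):
--     # Simpler decomposition: pop the maximal run of digit tops into a list,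
--     # then convert positionally (pop order is most-significant-first).
--     digits = []
--     while stack and 48 <= ord(stack[-1]) <= 57:
--         digits.append(stack.pop())
--     return sum((ord(c) - 48) * 10 ** i for i, c in enumerate(reversed(digits)))
-- ===== Notes on version B (the rewrite author's own statement) =====
-- stated objective: simpler
-- what changed: A's single while-loop with a peek helper, an 'on' flag and Horner accumulation (res*10+int(cur)) is replaced by a two-phase decomposition: pop the maximal run of digit tops into a list, then convert it by a closed positional sum over enumerate(reversed(digits)).
import Mathlib
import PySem

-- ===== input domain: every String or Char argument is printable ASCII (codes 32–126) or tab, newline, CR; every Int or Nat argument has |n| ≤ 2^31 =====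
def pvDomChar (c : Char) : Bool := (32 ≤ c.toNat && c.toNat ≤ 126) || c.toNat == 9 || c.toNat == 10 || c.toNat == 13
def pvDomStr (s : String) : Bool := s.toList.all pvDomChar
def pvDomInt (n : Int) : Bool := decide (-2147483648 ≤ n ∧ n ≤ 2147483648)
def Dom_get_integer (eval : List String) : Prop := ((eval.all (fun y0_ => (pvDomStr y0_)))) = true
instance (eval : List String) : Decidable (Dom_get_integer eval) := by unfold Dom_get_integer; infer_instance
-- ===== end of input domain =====

-- B replaces A's while/peek/flag Horner loop by "pop the digit run, then a positional sum"
-- (objective: simpler decomposition, same cost). Both Pythons pop the digit run off `eval`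
-- in place identically; the theorems below are about the return value.

-- ===== PORT A =====
-- peek(stack): top = None; if len >= 1: top = stack[len-1]  (stack[len-1] = last element)
def pvPeek (stack : List String) : Option String :=
  if stack.length ≥ 1 then stack.getLast? else none

-- ord(cur) in 48..57.  Python's ord RAISES on a string whose length ≠ 1; those inputs are
-- excluded by Pre_get_integer, and this test is false there.
def pvIsDig (s : String) : Bool :=
  match s.toList with
  | [c] => 48 ≤ c.toNat && c.toNat ≤ 57
  | _ => false

-- `cur` is None only when len(eval) < 1, where Python's `and` short-circuits before ord(cur)
def pvIsDigOpt : Option String → Bool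
  | some s => pvIsDig s
  | none => false

-- int(cur); cur is a single digit on every input reaching this (the branch test held)
def pvDigVal : Option String → Int
  | some s => (PySem.Int.ofStr? s).getD 0
  | none => 0

-- the while-loop of A: state (eval, res); `on = False` is the else-branch return
def get_integer_go (eval : List String) (res : Int) : Int :=
  let cur := pvPeek eval
  if h : 1 ≤ eval.length ∧ pvIsDigOpt cur = true then
    get_integer_go eval.dropLast (res * 10 + pvDigVal cur)
  else res
termination_by eval.length
decreasing_by
  have := h.1
  simp only [List.length_dropLast]
  omega

def get_integer (eval : List String) : Int := get_integer_go eval 0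

-- ===== PORT B =====
-- ord(c); Python raises on a string of length ≠ 1 (outside Pre_get_integer)
def altOrd (s : String) : Int :=
  match s.toList with
  | [c] => (c.toNat : Int)
  | _ => 0

-- the chained comparison 48 <= ord(stack[-1]) <= 57
def altCond (s : String) : Bool := 48 ≤ altOrd s && altOrd s ≤ 57

-- the while-loop of B: eval.pop() pops the top, i.e. the head of the reversed list;
-- digits.append(...) is acc ++ [s]
def altGo (rev acc : List String) : List String :=
  match rev with
  | [] => acc
  | s :: rest => if altCond s then altGo rest (acc ++ [s]) else acc

def get_integer_alt (eval : List String) : Int :=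
  let digits := altGo eval.reverse []
  (((PySem.List.enumerate digits.reverse).map
      (fun p => (altOrd p.2 - 48) * 10 ^ p.1.toNat)).sum)

-- ===== PRECONDITION & SPEC =====
-- Pre_ excludes exactly the inputs on which A raises (TypeError from ord): those where the
-- first element below the trailing run of single-digit tops is a string of length ≠ 1.
def Pre_get_integer (eval : List String) : Prop :=
  ((eval.reverse.dropWhile pvIsDig).head?.all (fun s => s.toList.length == 1)) = true
instance (eval : List String) : Decidable (Pre_get_integer eval) := by
  unfold Pre_get_integer; infer_instance

def pvWitness_get_integer : List String := ["+", "4", "2"]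

def Spec_get_integer (eval : List String) (out : Int) : Prop := out = get_integer_alt eval
instance (eval : List String) (out : Int) : Decidable (Spec_get_integer eval out) := by
  unfold Spec_get_integer; infer_instance

-- ===== CLAIM (what is proved, stated in full; the proofs are below) =====
def Claim_equal_get_integer : Prop := ∀ (eval : List String), Dom_get_integer eval → Pre_get_integer eval → Spec_get_integer eval (get_integer eval)

-- ===== LEMMAS AND PROOFS =====

-- A's loop, read off the reversed stack (top first)
def specA : List String → Int → Int
  | [], res => res
  | s :: rest, res =>
    if pvIsDig s then specA rest (res * 10 + (PySem.Int.ofStr? s).getD 0) else res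

theorem go_eq_specA (rev : List String) : ∀ res, get_integer_go rev.reverse res = specA rev res := by
  induction rev with
  | nil => intro res; rw [get_integer_go]; simp [specA]
  | cons s rest ih =>
    intro res
    rw [get_integer_go]
    simp only [List.reverse_cons, pvPeek, List.length_append, List.length_reverse,
      List.getLast?_concat, List.dropLast_concat, pvIsDigOpt, pvDigVal]
    by_cases h : pvIsDig s = true
    · simp [h, ih, specA]
    · simp [h, specA]

theorem specA_eq_foldl (rev : List String) : ∀ res,
    specA rev res = (rev.takeWhile pvIsDig).foldl
      (fun r s => r * 10 + (PySem.Int.ofStr? s).getD 0) res := by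
  induction rev with
  | nil => intro res; simp [specA]
  | cons s rest ih =>
    intro res
    by_cases h : pvIsDig s = true
    · simp [specA, h, ih]
    · simp [specA, h]

theorem altGo_eq (rev : List String) : ∀ acc, altGo rev acc = acc ++ rev.takeWhile altCond := by
  induction rev with
  | nil => intro acc; simp [altGo]
  | cons s rest ih =>
    intro acc
    by_cases h : altCond s = true
    · simp [altGo, h, ih]
    · simp [altGo, h]

-- B's loop test equals A's digit test on every string (both false where Python's ord raises)
theorem cond_eq : altCond = pvIsDig := by
  funext s
  unfold altCond altOrd pvIsDig
  rcases hs : s.toList with _ | ⟨c, _ | ⟨b, t⟩⟩ <;> simp [hs] <;> omega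

-- value of a single digit char
theorem ofChars_digit (c : Char) (h1 : 48 ≤ c.toNat) (h2 : c.toNat ≤ 57) :
    PySem.Int.ofChars? [c] = some ((c.toNat : Int) - 48) := by
  have hc : Char.ofNat c.toNat = c := Char.ofNat_toNat c
  interval_cases h : c.toNat <;> rw [← hc] <;> decide

theorem dval_eq_ord (s : String) (h : pvIsDig s = true) :
    (PySem.Int.ofStr? s).getD 0 = altOrd s - 48 := by
  unfold pvIsDig at h
  match hs : s.toList with
  | [c] =>
    rw [hs] at h
    simp only [Bool.and_eq_true, decide_eq_true_eq] at h
    have hse : s = String.ofList [c] := String.ext (by rw [hs, String.toList_ofList])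
    rw [hse, PySem.Int.ofStr?_ofList, ofChars_digit c h.1 h.2]
    simp [altOrd, String.toList_ofList]
  | [] => rw [hs] at h; simp at h
  | a :: b :: t => rw [hs] at h; simp at h

-- the positional sum of B over a digit list
def psum (ds : List String) : Int :=
  ((PySem.List.enumerate ds.reverse).map (fun p => (altOrd p.2 - 48) * 10 ^ p.1.toNat)).sum

theorem psum_cons (s : String) (t : List String) :
    psum (s :: t) = psum t + (altOrd s - 48) * 10 ^ t.length := by
  unfold psum
  rw [List.reverse_cons, PySem.List.enumerate_append]
  simp [PySem.List.enumerate_cons]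

theorem foldl_horner_eq_psum (ds : List String) : ∀ res,
    ds.foldl (fun r s => r * 10 + (altOrd s - 48)) res = res * 10 ^ ds.length + psum ds := by
  induction ds with
  | nil => intro res; simp [psum]
  | cons s t ih =>
    intro res
    rw [List.foldl_cons, ih, psum_cons, List.length_cons, pow_succ]
    ring

-- ===== VERDICT (by name: the statement is the Claim_ definition above) =====
theorem get_integer_spec : Claim_equal_get_integer := by
  intro eval _ _
  unfold Spec_get_integer get_integer get_integer_alt
  have hA : get_integer_go eval 0 = specA eval.reverse 0 := by
    conv_lhs => rw [show eval = eval.reverse.reverse from by simp]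
    exact go_eq_specA _ 0
  rw [hA, specA_eq_foldl, altGo_eq, List.nil_append,
      cond_eq]
  show _ = psum (List.takeWhile pvIsDig eval.reverse)
  rw [PySem.List.foldl_congr_mem _ _ (fun r s => r * 10 + (altOrd s - 48)) _
      (fun acc x hx => by rw [dval_eq_ord x (List.mem_takeWhile_imp hx)])]
  rw [foldl_horner_eq_psum]
  simp
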